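-- pv_equiv track=rewrite | github.com/takeharukato/ansibleConfigGenerator | tests/tests_py/asserts.py | _norm_owner
-- ===== SOURCE A (Python) =====
-- from typing import Dict, Iterable, Any, List
--
-- def _norm_owner(o: Any) -> str:
--     """
--     所有者表現を 'user:group' 形式へ正規化します。
--
--     Args:
--         o (Any): 所有者表現。
--
--     Returns:
--         str: 正規化後の所有者。
--     """
--     if o is None:
--         return ""
--     s = str(o).strip()
--     # Common forms: 'user:group', 'user group', 'uid:gid'
--     s = s.replace(" ", ":")
--     # collapse multiple ':'
--     while "::" in s:
--         s = s.replace("::", ":")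
--     return s
-- ===== SOURCE B (Python) =====
-- def _norm_owner(o):
--     """Normalize owner to 'user:group' form: single forward pass collapsing
--     separator runs, instead of replace + repeated whole-string rescans."""
--     if o is None:
--         return ""
--     s = str(o).strip()
--     out = []
--     for ch in s:
--         c = ":" if ch == " " else ch
--         if c == ":" and out and out[-1] == ":":
--             continue
--         out.append(c)
--     return "".join(out)
-- ===== Notes on version B (the rewrite author's own statement) =====
-- stated objective: simpler
-- what changed: Replaces A's space-to-colon replace followed by a repeated whole-string collapse-rescan loop with one forward pass that maps each space to a colon and skips a colon whenever the last emitted character is already a colon.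
import Mathlib
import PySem

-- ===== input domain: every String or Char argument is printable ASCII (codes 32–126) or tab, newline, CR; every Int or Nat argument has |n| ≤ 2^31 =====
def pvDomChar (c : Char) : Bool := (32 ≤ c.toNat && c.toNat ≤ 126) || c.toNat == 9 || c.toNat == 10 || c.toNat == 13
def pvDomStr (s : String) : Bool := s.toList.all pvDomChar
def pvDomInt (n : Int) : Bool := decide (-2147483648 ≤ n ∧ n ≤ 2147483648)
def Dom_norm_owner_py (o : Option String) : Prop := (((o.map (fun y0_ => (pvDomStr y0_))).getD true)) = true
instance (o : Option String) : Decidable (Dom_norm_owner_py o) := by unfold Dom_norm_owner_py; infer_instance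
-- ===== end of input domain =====

-- B is a single forward pass collapsing separator runs while scanning, instead of A's
-- replace(" ", ":") followed by repeated whole-string '::'→':' rescans (objective: simpler).

-- ===== PORT A =====
-- one halving pass of Python's s.replace("::", ":") (left-to-right, non-overlapping);
-- used only to characterise PySem.Chars.replace for the loop's termination proof
def pvStep : List Char → List Char
  | [] => []
  | [c] => [c]
  | a :: b :: t => if a = ':' ∧ b = ':' then ':' :: pvStep t else a :: pvStep (b :: t)

-- Bool form of "some two adjacent chars are both ':'"
def pvHasCC : List Char → Bool
  | [] => false
  | [_] => false
  | a :: b :: t => (a = ':' && b = ':') || pvHasCC (b :: t)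

theorem pv_go_cc (fuel : Nat) : ∀ (l acc : List Char), l.length ≤ fuel →
    PySem.Chars.replace.go [':', ':'] [':'] fuel l acc = acc.reverse ++ pvStep l := by
  induction fuel with
  | zero =>
      intro l acc h
      rw [PySem.Chars.replace.go.eq_def]
      cases l with
      | nil => simp [pvStep]
      | cons c t => simp at h
  | succ n ih =>
      intro l acc h
      rw [PySem.Chars.replace.go.eq_def]
      cases l with
      | nil => simp [pvStep]
      | cons c t =>
        dsimp only
        cases t with
        | nil =>
          rw [if_neg (by simp [List.isPrefixOf])]
          rw [ih [] (c :: acc) (by simp)]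
          simp [pvStep]
        | cons d u =>
          simp only [List.length_cons] at h
          by_cases hcd : c = ':' ∧ d = ':'
          · obtain ⟨hc, hd⟩ := hcd
            subst hc; subst hd
            rw [if_pos (by simp [List.isPrefixOf])]
            rw [show List.drop [':', ':'].length (':' :: ':' :: u) = u from rfl]
            rw [ih u ([':'].reverse ++ acc) (by omega)]
            simp [pvStep]
          · rw [if_neg (by simp [List.isPrefixOf]; rintro rfl rfl; exact hcd ⟨rfl, rfl⟩)]
            rw [ih (d :: u) (c :: acc) (by simp; omega)]
            simp [pvStep, if_neg hcd]

theorem pv_rep_cc (l : List Char) :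
    PySem.Chars.replace l [':', ':'] [':'] = pvStep l := by
  rw [PySem.Chars.replace]
  simp only [List.isEmpty_cons]
  simpa using pv_go_cc l.length l [] (le_refl _)

theorem pvStep_len_le (l : List Char) : (pvStep l).length ≤ l.length := by
  induction l using pvStep.induct with
  | case1 => simp [pvStep]
  | case2 c => simp [pvStep]
  | case3 a b t h ih => simp [pvStep, if_pos h]; omega
  | case4 a b t h ih => simp [pvStep, if_neg h]; simp at ih; omega

theorem pvStep_len_lt (l : List Char) (h : pvHasCC l = true) :
    (pvStep l).length < l.length := by
  induction l using pvStep.induct with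
  | case1 => simp [pvHasCC] at h
  | case2 c => simp [pvHasCC] at h
  | case3 a b t hab ih =>
      have := pvStep_len_le t
      simp [pvStep, if_pos hab]; omega
  | case4 a b t hab ih =>
      simp [pvHasCC] at h
      rcases h with ⟨h1, h2⟩ | h
      · exact absurd ⟨h1, h2⟩ hab
      · have := ih h
        simp [pvStep, if_neg hab]; simpa using this

theorem pv_infix_hasCC (l : List Char) : [':', ':'] <:+: l ↔ pvHasCC l = true := by
  induction l with
  | nil => simp [pvHasCC]
  | cons a t ih =>
      cases t with
      | nil => simp [pvHasCC, List.infix_cons_iff, List.cons_prefix_cons]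
      | cons b u =>
          rw [List.infix_cons_iff]
          constructor
          · rintro (h | h)
            · rw [List.cons_prefix_cons] at h
              obtain ⟨ha, h⟩ := h
              rw [List.cons_prefix_cons] at h
              obtain ⟨hb, -⟩ := h
              simp [pvHasCC, ha.symm, hb.symm]
            · have := ih.mp h
              simp [pvHasCC, this]
          · intro h
            simp only [pvHasCC, Bool.or_eq_true, Bool.and_eq_true, decide_eq_true_eq] at h
            rcases h with ⟨ha, hb⟩ | h
            · exact Or.inl (by subst ha; subst hb; simp [List.cons_prefix_cons])
            · exact Or.inr (ih.mpr h)

theorem pv_isIn_hasCC (s : String) :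
    PySem.Str.isIn "::" s = pvHasCC s.toList := by
  have hb : PySem.Str.isIn "::" s = PySem.Chars.isIn [':', ':'] s.toList := by
    simp [PySem.Str.isIn]
  rw [hb]
  cases h : pvHasCC s.toList
  · refine (PySem.Chars.isIn_eq_false_iff _ _).mpr (fun hin => ?_)
    have := (pv_infix_hasCC s.toList).mp hin
    simp [h] at this
  · exact (PySem.Chars.isIn_iff_infix _ _).mpr ((pv_infix_hasCC _).mpr h)

-- 'while "::" in s: s = s.replace("::", ":")'
def pvNormLoopA (s : String) : String :=
  if PySem.Str.isIn "::" s then pvNormLoopA (PySem.Str.replace s "::" ":") else s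
termination_by s.toList.length
decreasing_by
  rename_i h
  have hcc : pvHasCC s.toList = true := by rw [← pv_isIn_hasCC]; exact h
  have : (PySem.Str.replace s "::" ":").toList = pvStep s.toList := by
    simp [PySem.Str.toList_replace]
    exact pv_rep_cc _
  rw [this]
  exact pvStep_len_lt _ hcc

def norm_owner_py (o : Option String) : String :=
  match o with
  | none => ""
  | some x =>
      let s := PySem.Str.strip x
      let s := PySem.Str.replace s " " ":"
      pvNormLoopA s

-- ===== PORT B =====
def norm_owner_py_alt (o : Option String) : String :=
  match o with
  | none => ""
  | some x =>
      let s := PySem.Str.strip x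
      let out := s.toList.foldl (fun out ch =>
        let c := if ch = ' ' then ':' else ch
        if c = ':' ∧ out ≠ [] ∧ out.getLast? = some ':' then out else out ++ [c]) []
      String.ofList out

-- ===== PRECONDITION & SPEC =====
def Spec_norm_owner_py (o : Option String) (out : String) : Prop := out = norm_owner_py_alt o
instance (o : Option String) (out : String) : Decidable (Spec_norm_owner_py o out) := by unfold Spec_norm_owner_py; infer_instance

-- ===== CLAIM (what is proved, stated in full; the proofs are below) =====
def Claim_equal_norm_owner_py : Prop := ∀ (o : Option String), Dom_norm_owner_py o → Spec_norm_owner_py o (norm_owner_py o)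

-- ===== LEMMAS AND PROOFS =====

-- canonical collapse of ':' runs (b = "last emitted char was ':'")
def pvCollapse : Bool → List Char → List Char
  | _, [] => []
  | b, c :: t =>
      if c = ':' then (if b then pvCollapse true t else ':' :: pvCollapse true t)
      else c :: pvCollapse false t

def pvSigma (c : Char) : Char := if c = ' ' then ':' else c

theorem pv_go_sp (fuel : Nat) : ∀ (l acc : List Char), l.length ≤ fuel →
    PySem.Chars.replace.go [' '] [':'] fuel l acc = acc.reverse ++ l.map pvSigma := by
  induction fuel with
  | zero =>
      intro l acc h
      rw [PySem.Chars.replace.go.eq_def]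
      cases l with
      | nil => simp
      | cons c t => simp at h
  | succ n ih =>
      intro l acc h
      rw [PySem.Chars.replace.go.eq_def]
      cases l with
      | nil => simp
      | cons c t =>
        dsimp only
        simp only [List.length_cons] at h
        by_cases hc : c = ' '
        · subst hc
          rw [if_pos (by simp [List.isPrefixOf])]
          rw [show List.drop [' '].length (' ' :: t) = t from rfl]
          rw [ih t ([':'].reverse ++ acc) (by omega)]
          simp [pvSigma]
        · rw [if_neg (by simp [List.isPrefixOf]; exact fun h => absurd h.symm hc)]
          rw [ih t (c :: acc) (by omega)]
          simp [pvSigma, hc]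

theorem pv_rep_sp (l : List Char) :
    PySem.Chars.replace l [' '] [':'] = l.map pvSigma := by
  rw [PySem.Chars.replace]
  simp only [List.isEmpty_cons]
  simpa using pv_go_sp l.length l [] (le_refl _)

theorem pv_collapse_step (l : List Char) : ∀ b, pvCollapse b (pvStep l) = pvCollapse b l := by
  induction l using pvStep.induct with
  | case1 => intro b; rfl
  | case2 c => intro b; rfl
  | case3 a b t hab ih =>
      intro bb
      obtain ⟨ha, hb⟩ := hab
      subst ha; subst hb
      cases bb <;> simp [pvStep, pvCollapse, ih]
  | case4 a b t hab ih =>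
      intro bb
      simp only [pvStep, if_neg hab]
      by_cases ha : a = ':'
      · simp [pvCollapse, ha, ih]
      · simp [pvCollapse, ha, ih]

theorem pv_collapse_fix (l : List Char) (h : pvHasCC l = false) :
    ∀ b, (b = true → l.head? ≠ some ':') → pvCollapse b l = l := by
  induction l with
  | nil => intro b _; rfl
  | cons c t ih =>
      intro b hb
      by_cases hc : c = ':'
      · subst hc
        have hbf : b = false := by
          cases b
          · rfl
          · exact absurd rfl (hb rfl)
        subst hbf
        have hcc : pvHasCC t = false ∧ (t.head? ≠ some ':') := by
          cases t with
          | nil => simp [pvHasCC] at h ⊢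
          | cons d u =>
            simp [pvHasCC] at h
            exact ⟨h.2, by simpa using h.1⟩
        simp [pvCollapse, ih hcc.1 true (fun _ => hcc.2)]
      · have hcc : pvHasCC t = false := by
          cases t with
          | nil => rfl
          | cons d u => simp [pvHasCC] at h; exact h.2
        simp [pvCollapse, hc, ih hcc false (by simp)]

theorem pv_normLoopA_eq (s : String) :
    pvNormLoopA s = String.ofList (pvCollapse false s.toList) := by
  rw [pvNormLoopA]
  by_cases h : PySem.Str.isIn "::" s = true
  · rw [if_pos h]
    have hcc : pvHasCC s.toList = true := by rw [← pv_isIn_hasCC]; exact h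
    have hrep : (PySem.Str.replace s "::" ":").toList = pvStep s.toList := by
      simp [PySem.Str.toList_replace]
      exact pv_rep_cc _
    rw [pv_normLoopA_eq (PySem.Str.replace s "::" ":"), hrep, pv_collapse_step]
  · rw [if_neg h]
    have hcc : pvHasCC s.toList = false := by
      rw [← pv_isIn_hasCC]; exact Bool.eq_false_iff.mpr h
    rw [pv_collapse_fix s.toList hcc false (by simp), String.ofList_toList]
termination_by s.toList.length
decreasing_by
  have hcc : pvHasCC s.toList = true := by rw [← pv_isIn_hasCC]; assumption
  rw [hrep]
  exact pvStep_len_lt _ hcc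

def pvF (out : List Char) (ch : Char) : List Char :=
  if (if ch = ' ' then ':' else ch) = ':' ∧ out ≠ [] ∧ out.getLast? = some ':' then out
  else out ++ [if ch = ' ' then ':' else ch]

theorem pv_foldB (t : List Char) : ∀ (out : List Char),
    t.foldl pvF out
      = out ++ pvCollapse (decide (out ≠ [] ∧ out.getLast? = some ':')) (t.map pvSigma) := by
  induction t with
  | nil => intro out; simp [pvCollapse]
  | cons ch t ih =>
      intro out
      simp only [List.foldl_cons, List.map_cons]
      by_cases hc : (if ch = ' ' then ':' else ch) = ':'
      · have hσ : pvSigma ch = ':' := by simpa [pvSigma] using hc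
        by_cases hb : out ≠ [] ∧ out.getLast? = some ':'
        · have hf : pvF out ch = out := by unfold pvF; exact if_pos ⟨hc, hb⟩
          rw [hf, ih out, decide_eq_true hb]
          simp [pvCollapse, hσ]
        · have hf : pvF out ch = out ++ [':'] := by
            unfold pvF; rw [if_neg (fun h => hb h.2), hc]
          rw [hf, ih (out ++ [':'])]
          have h1 : ((out ++ [':']) ≠ [] ∧ (out ++ [':']).getLast? = some ':') :=
            ⟨by simp, by simp⟩
          rw [decide_eq_true h1, decide_eq_false hb]
          simp [pvCollapse, hσ]
      · have hch : ch ≠ ' ' := fun h => hc (by simp [h])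
        have hσ : pvSigma ch = ch := by simp [pvSigma, hch]
        have hne : ch ≠ ':' := by
          intro h; exact hc (by simp [h])
        have hf : pvF out ch = out ++ [ch] := by
          unfold pvF; rw [if_neg (fun h => hc h.1), if_neg hch]
        rw [hf, ih (out ++ [ch])]
        have h2 : ¬((out ++ [ch]) ≠ [] ∧ (out ++ [ch]).getLast? = some ':') := by
          rintro ⟨-, h⟩
          simp at h
          exact hne h
        rw [decide_eq_false h2]
        simp [pvCollapse, hσ, hne]

-- ===== VERDICT (by name: the statement is the Claim_ definition above) =====
set_option maxHeartbeats 1000000 in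
theorem norm_owner_py_spec : Claim_equal_norm_owner_py := by
  intro o _
  unfold Spec_norm_owner_py norm_owner_py norm_owner_py_alt
  cases o with
  | none => rfl
  | some x =>
      dsimp only
      rw [show (PySem.Str.strip x).toList.foldl (fun out ch =>
            let c := if ch = ' ' then ':' else ch
            if c = ':' ∧ out ≠ [] ∧ out.getLast? = some ':' then out else out ++ [c]) []
          = (PySem.Str.strip x).toList.foldl pvF [] from rfl]
      have hrep : (PySem.Str.replace (PySem.Str.strip x) " " ":").toList
          = (PySem.Str.strip x).toList.map pvSigma := by
        simp [PySem.Str.toList_replace]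
        exact pv_rep_sp _
      rw [pv_foldB, pv_normLoopA_eq, hrep]
      simp
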